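-- pv_equiv track=rewrite | github.com/PatonaIM/BMAD_SIEG | backend/app/services/interview_engine.py | _generate_skill_assessments
-- ===== SOURCE A (Python) =====
-- def _generate_skill_assessments(skill_boundaries: dict) -> list[dict]:
--     """
--     Generate structured skill assessment breakdown.
--
--     Args:
--         skill_boundaries: Dict mapping skill_area -> proficiency_level
--
--     Returns:
--         List of skill assessment dicts with display names
--     """
--     skill_display_names = {
--         "react_fundamentals": "React Fundamentals",
--         "react_hooks": "React Hooks",
--         "state_management": "State Management",
--         "async_programming": "Async Programming",
--         "python_basics": "Python Basics",
--         "data_structures": "Data Structures",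
--         "algorithms": "Algorithms",
--         "web_apis": "Web APIs",
--         "testing": "Testing & QA",
--         "performance_optimization": "Performance Optimization",
--         "security": "Security Best Practices",
--         "database": "Database Design",
--         "general": "General Programming"
--     }
--
--     assessments = []
--     for skill_area, proficiency in skill_boundaries.items():
--         assessments.append({
--             "skill_area": skill_area,
--             "proficiency_level": proficiency,
--             "display_name": skill_display_names.get(skill_area, skill_area.replace("_", " ").title())
--         })
--
--     # Sort by proficiency (expert -> novice) for better UX
--     proficiency_order = {"expert": 0, "proficient": 1, "intermediate": 2, "novice": 3}
--     assessments.sort(key=lambda x: proficiency_order.get(x["proficiency_level"], 4))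
--
--     return assessments
-- ===== SOURCE B (Python) =====
-- def _generate_skill_assessments(skill_boundaries: dict) -> list[dict]:
--     """Bucket version: the display-name table is reduced to the five overrides
--     that differ from the generic title-cased fallback; proficiency rank is an
--     if-chain; each item goes into one of five rank buckets in a single pass and
--     the buckets are concatenated in rank order (no comparison sort)."""
--     display_overrides = {
--         "web_apis": "Web APIs",
--         "testing": "Testing & QA",
--         "security": "Security Best Practices",
--         "database": "Database Design",
--         "general": "General Programming",
--     }
--
--     def display(skill_area):
--         return display_overrides.get(skill_area, skill_area.replace("_", " ").title())
--
--     def rank(proficiency):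
--         if proficiency == "expert":
--             return 0
--         if proficiency == "proficient":
--             return 1
--         if proficiency == "intermediate":
--             return 2
--         if proficiency == "novice":
--             return 3
--         return 4
--
--     buckets = [[], [], [], [], []]
--     for skill_area, proficiency in skill_boundaries.items():
--         buckets[rank(proficiency)].append({
--             "skill_area": skill_area,
--             "proficiency_level": proficiency,
--             "display_name": display(skill_area),
--         })
--     return [row for bucket in buckets for row in bucket]
-- ===== Notes on version B (the rewrite author's own statement) =====
-- stated objective: alternative
-- what changed: Replaces the build-then-comparison-sort with a single pass dropping each assessment into one of five proficiency-rank buckets concatenated in rank order, and replaces the 13-entry display-name dict by a 5-entry override table (only the names that differ from the title-cased fallback) plus an if-chain rank; stability and the unknown-goes-last rule are preserved.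
import Mathlib
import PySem

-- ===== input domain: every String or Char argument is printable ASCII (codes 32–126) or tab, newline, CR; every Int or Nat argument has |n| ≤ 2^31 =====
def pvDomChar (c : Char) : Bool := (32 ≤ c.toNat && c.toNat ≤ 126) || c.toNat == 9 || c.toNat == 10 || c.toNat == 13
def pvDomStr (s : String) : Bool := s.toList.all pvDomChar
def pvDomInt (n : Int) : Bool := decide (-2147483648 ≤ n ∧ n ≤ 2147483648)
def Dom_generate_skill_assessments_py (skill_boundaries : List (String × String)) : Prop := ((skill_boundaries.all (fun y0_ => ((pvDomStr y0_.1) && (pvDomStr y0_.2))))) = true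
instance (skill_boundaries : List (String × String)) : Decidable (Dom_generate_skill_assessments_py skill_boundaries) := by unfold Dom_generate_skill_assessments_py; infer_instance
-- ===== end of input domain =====

-- B replaces A's build-then-comparison-sort by a single pass into five proficiency-rank
-- buckets concatenated in rank order, with a 5-entry display-name override table in place
-- of A's 13-entry dict (objective: alternative algorithm, equal output proved).

-- ===== PORT A =====
-- str.title() on the ASCII domain: a letter is uppercased after a non-letter, lowercased after a letter
def pvTitleGo (prev : Bool) : List Char → List Char
  | [] => []
  | c :: cs => (if c.isAlpha then (if prev then c.toLower else c.toUpper) else c) :: pvTitleGo c.isAlpha cs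

def pvTitle (s : String) : String := String.ofList (pvTitleGo false s.toList)

-- A's literal 13-entry display-name dict
def pvDisplayNames : PySem.Dict String String := PySem.Dict.mk
  [("react_fundamentals", "React Fundamentals"),
   ("react_hooks", "React Hooks"),
   ("state_management", "State Management"),
   ("async_programming", "Async Programming"),
   ("python_basics", "Python Basics"),
   ("data_structures", "Data Structures"),
   ("algorithms", "Algorithms"),
   ("web_apis", "Web APIs"),
   ("testing", "Testing & QA"),
   ("performance_optimization", "Performance Optimization"),
   ("security", "Security Best Practices"),
   ("database", "Database Design"),
   ("general", "General Programming")]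

-- A's proficiency_order dict
def pvProfOrder : PySem.Dict String Int := PySem.Dict.mk
  [("expert", 0), ("proficient", 1), ("intermediate", 2), ("novice", 3)]

-- the assessment dict A builds for one (skill_area, proficiency) item
def pvMkAssessment (k v : String) : List (String × String) :=
  [("skill_area", k), ("proficiency_level", v),
   ("display_name", pvDisplayNames.getD k (pvTitle (PySem.Str.replace k "_" " ")))]

-- A's sort key lambda: proficiency_order.get(x["proficiency_level"], 4)
def pvKeyA (x : List (String × String)) : Int :=
  pvProfOrder.getD ((PySem.Dict.mk x).getD "proficiency_level" "") 4

def generate_skill_assessments_py (skill_boundaries : List (String × String)) : List (List (String × String)) :=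
  let assessments := (PySem.Dict.ofList skill_boundaries).items.foldl
    (fun acc kv => acc ++ [pvMkAssessment kv.1 kv.2]) []
  PySem.List.sorted assessments pvKeyA false

-- ===== PORT B =====
abbrev PvRows := List (List (String × String))

-- B's 5-entry override table: only the display names that differ from the title-cased fallback
def pvOverrides : PySem.Dict String String := PySem.Dict.mk
  [("web_apis", "Web APIs"),
   ("testing", "Testing & QA"),
   ("security", "Security Best Practices"),
   ("database", "Database Design"),
   ("general", "General Programming")]

-- B's display(skill_area) helper
def pvDisplayB (k : String) : String :=
  pvOverrides.getD k (pvTitle (PySem.Str.replace k "_" " "))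

-- B's rank(proficiency) if-chain
def pvRankB (p : String) : Int :=
  if p = "expert" then 0
  else if p = "proficient" then 1
  else if p = "intermediate" then 2
  else if p = "novice" then 3
  else 4

-- the assessment dict B builds for one item
def pvRowB (k v : String) : List (String × String) :=
  [("skill_area", k), ("proficiency_level", v), ("display_name", pvDisplayB k)]

def pvBucketStep (bs : PvRows × PvRows × PvRows × PvRows × PvRows) (kv : String × String) :
    PvRows × PvRows × PvRows × PvRows × PvRows :=
  let a := pvRowB kv.1 kv.2
  let r := pvRankB kv.2
  if r = 0 then (bs.1 ++ [a], bs.2.1, bs.2.2.1, bs.2.2.2.1, bs.2.2.2.2)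
  else if r = 1 then (bs.1, bs.2.1 ++ [a], bs.2.2.1, bs.2.2.2.1, bs.2.2.2.2)
  else if r = 2 then (bs.1, bs.2.1, bs.2.2.1 ++ [a], bs.2.2.2.1, bs.2.2.2.2)
  else if r = 3 then (bs.1, bs.2.1, bs.2.2.1, bs.2.2.2.1 ++ [a], bs.2.2.2.2)
  else (bs.1, bs.2.1, bs.2.2.1, bs.2.2.2.1, bs.2.2.2.2 ++ [a])

def generate_skill_assessments_py_alt (skill_boundaries : List (String × String)) : List (List (String × String)) :=
  let bs := (PySem.Dict.ofList skill_boundaries).items.foldl pvBucketStep ([], [], [], [], [])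
  bs.1 ++ bs.2.1 ++ bs.2.2.1 ++ bs.2.2.2.1 ++ bs.2.2.2.2

-- ===== PRECONDITION & SPEC =====
def Spec_generate_skill_assessments_py (skill_boundaries : List (String × String)) (out : List (List (String × String))) : Prop := out = generate_skill_assessments_py_alt skill_boundaries
instance (skill_boundaries : List (String × String)) (out : List (List (String × String))) : Decidable (Spec_generate_skill_assessments_py skill_boundaries out) := by unfold Spec_generate_skill_assessments_py; infer_instance

-- ===== CLAIM (what is proved, stated in full; the proofs are below) =====
def Claim_equal_generate_skill_assessments_py : Prop := ∀ (skill_boundaries : List (String × String)), Dom_generate_skill_assessments_py skill_boundaries → Spec_generate_skill_assessments_py skill_boundaries (generate_skill_assessments_py skill_boundaries)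

-- ===== LEMMAS AND PROOFS =====

-- B's 5-entry override lookup agrees with A's 13-entry dict lookup on every key:
-- the 8 keys B drops are exactly those whose A-value equals the title-cased fallback.
theorem pvDisplayB_eq (k : String) :
    pvDisplayB k = pvDisplayNames.getD k (pvTitle (PySem.Str.replace k "_" " ")) := by
  by_cases h1 : k = "react_fundamentals"; · subst h1; decide
  by_cases h2 : k = "react_hooks"; · subst h2; decide
  by_cases h3 : k = "state_management"; · subst h3; decide
  by_cases h4 : k = "async_programming"; · subst h4; decide
  by_cases h5 : k = "python_basics"; · subst h5; decide
  by_cases h6 : k = "data_structures"; · subst h6; decide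
  by_cases h7 : k = "algorithms"; · subst h7; decide
  by_cases h8 : k = "web_apis"; · subst h8; decide
  by_cases h9 : k = "testing"; · subst h9; decide
  by_cases h10 : k = "performance_optimization"; · subst h10; decide
  by_cases h11 : k = "security"; · subst h11; decide
  by_cases h12 : k = "database"; · subst h12; decide
  by_cases h13 : k = "general"; · subst h13; decide
  simp [pvDisplayB, pvOverrides, pvDisplayNames, PySem.Dict.getD_eq_get?_getD,
    PySem.Dict.get?, List.find?,
    beq_eq_false_iff_ne.mpr (Ne.symm h1), beq_eq_false_iff_ne.mpr (Ne.symm h2),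
    beq_eq_false_iff_ne.mpr (Ne.symm h3), beq_eq_false_iff_ne.mpr (Ne.symm h4),
    beq_eq_false_iff_ne.mpr (Ne.symm h5), beq_eq_false_iff_ne.mpr (Ne.symm h6),
    beq_eq_false_iff_ne.mpr (Ne.symm h7), beq_eq_false_iff_ne.mpr (Ne.symm h8),
    beq_eq_false_iff_ne.mpr (Ne.symm h9), beq_eq_false_iff_ne.mpr (Ne.symm h10),
    beq_eq_false_iff_ne.mpr (Ne.symm h11), beq_eq_false_iff_ne.mpr (Ne.symm h12),
    beq_eq_false_iff_ne.mpr (Ne.symm h13)]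

theorem pvRow_eq (k v : String) : pvRowB k v = pvMkAssessment k v := by
  simp [pvRowB, pvMkAssessment, pvDisplayB_eq]

theorem pvProf_getD (v : String) : pvProfOrder.getD v 4 = pvRankB v := by
  by_cases h1 : v = "expert"; · subst h1; decide
  by_cases h2 : v = "proficient"; · subst h2; decide
  by_cases h3 : v = "intermediate"; · subst h3; decide
  by_cases h4 : v = "novice"; · subst h4; decide
  simp [pvProfOrder, pvRankB, PySem.Dict.getD_eq_get?_getD, PySem.Dict.get?, List.find?,
    beq_eq_false_iff_ne.mpr (Ne.symm h1), beq_eq_false_iff_ne.mpr (Ne.symm h2),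
    beq_eq_false_iff_ne.mpr (Ne.symm h3), beq_eq_false_iff_ne.mpr (Ne.symm h4), h1, h2, h3, h4]

theorem pvKeyA_row (k v : String) : pvKeyA (pvRowB k v) = pvRankB v := by
  rw [← pvProf_getD]
  simp [pvKeyA, pvRowB, PySem.Dict.getD_eq_get?_getD, PySem.Dict.get?]

theorem pvRankB_cases (v : String) :
    pvRankB v = 0 ∨ pvRankB v = 1 ∨ pvRankB v = 2 ∨ pvRankB v = 3 ∨ pvRankB v = 4 := by
  simp only [pvRankB]; split_ifs <;> simp

theorem insertBy_skip {α : Type} (before : α → α → Bool) (x : α) (p s : List α)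
    (h : ∀ y ∈ p, before x y = false) :
    PySem.List.insertBy before x (p ++ s) = p ++ PySem.List.insertBy before x s := by
  induction p with
  | nil => rfl
  | cons y t ih =>
    have hy : before x y = false := h y (by simp)
    simp [PySem.List.insertBy, hy, ih (fun z hz => h z (by simp [hz]))]

theorem insertBy_head {α : Type} (before : α → α → Bool) (x : α) (s : List α)
    (h : ∀ y ∈ s, before x y = true) :
    PySem.List.insertBy before x s = x :: s := by
  cases s with
  | nil => rfl
  | cons y t => simp [PySem.List.insertBy, h y (by simp)]

theorem foldl_append_map (l : List (String × String)) (acc : List (List (String × String))) :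
    l.foldl (fun acc kv => acc ++ [pvMkAssessment kv.1 kv.2]) acc
      = acc ++ l.map (fun kv => pvMkAssessment kv.1 kv.2) := by
  induction l generalizing acc with
  | nil => simp
  | cons kv t ih => simp [ih]

theorem pv_main (l : List (String × String))
    (b0 b1 b2 b3 b4 : PvRows)
    (h0 : ∀ a ∈ b0, pvKeyA a = 0) (h1 : ∀ a ∈ b1, pvKeyA a = 1)
    (h2 : ∀ a ∈ b2, pvKeyA a = 2) (h3 : ∀ a ∈ b3, pvKeyA a = 3)
    (h4 : ∀ a ∈ b4, pvKeyA a = 4) :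
    (l.map (fun kv => pvRowB kv.1 kv.2)).foldl
        (fun acc x => PySem.List.insertBy (fun a b => decide (pvKeyA a < pvKeyA b)) x acc)
        (b0 ++ b1 ++ b2 ++ b3 ++ b4)
      = (fun bs : PvRows × PvRows × PvRows × PvRows × PvRows =>
          bs.1 ++ bs.2.1 ++ bs.2.2.1 ++ bs.2.2.2.1 ++ bs.2.2.2.2)
        (l.foldl pvBucketStep (b0, b1, b2, b3, b4)) := by
  induction l generalizing b0 b1 b2 b3 b4 with
  | nil => rfl
  | cons kv t ih =>
    have hk : pvKeyA (pvRowB kv.1 kv.2) = pvRankB kv.2 := pvKeyA_row kv.1 kv.2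
    set x := pvRowB kv.1 kv.2 with hx
    set bef := fun a b => decide (pvKeyA a < pvKeyA b) with hbef
    rcases pvRankB_cases kv.2 with hr | hr | hr | hr | hr
    · have hins : PySem.List.insertBy bef x (b0 ++ b1 ++ b2 ++ b3 ++ b4)
          = (b0 ++ [x]) ++ b1 ++ b2 ++ b3 ++ b4 := by
        rw [show b0 ++ b1 ++ b2 ++ b3 ++ b4 = b0 ++ (b1 ++ b2 ++ b3 ++ b4) by simp,
          insertBy_skip bef x b0 _ (fun y hy => by simp [hbef, h0 y hy, hk, hr]),
          insertBy_head bef x _ (by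
            intro y hy
            simp only [List.append_assoc, List.mem_append] at hy
            rcases hy with hy | hy | hy | hy
            · simp [hbef, hk, hr, h1 y hy]
            · simp [hbef, hk, hr, h2 y hy]
            · simp [hbef, hk, hr, h3 y hy]
            · simp [hbef, hk, hr, h4 y hy])]
        simp
      have hstep : pvBucketStep (b0, b1, b2, b3, b4) kv = (b0 ++ [x], b1, b2, b3, b4) := by
        simp [pvBucketStep, hr, ← hx]
      simp only [List.foldl_cons, List.map_cons, ← hx, hins, hstep]
      exact ih (b0 ++ [x]) b1 b2 b3 b4
        (fun a ha => by rcases List.mem_append.1 ha with ha | ha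
                        · exact h0 a ha
                        · simp only [List.mem_singleton] at ha; simpa [ha, hk] using hr) h1 h2 h3 h4
    · have hins : PySem.List.insertBy bef x (b0 ++ b1 ++ b2 ++ b3 ++ b4)
          = b0 ++ (b1 ++ [x]) ++ b2 ++ b3 ++ b4 := by
        rw [show b0 ++ b1 ++ b2 ++ b3 ++ b4 = b0 ++ (b1 ++ (b2 ++ b3 ++ b4)) by simp,
          insertBy_skip bef x b0 _ (fun y hy => by simp [hbef, h0 y hy, hk, hr]),
          insertBy_skip bef x b1 _ (fun y hy => by simp [hbef, h1 y hy, hk, hr]),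
          insertBy_head bef x _ (by
            intro y hy
            simp only [List.append_assoc, List.mem_append] at hy
            rcases hy with hy | hy | hy
            · simp [hbef, hk, hr, h2 y hy]
            · simp [hbef, hk, hr, h3 y hy]
            · simp [hbef, hk, hr, h4 y hy])]
        simp
      have hstep : pvBucketStep (b0, b1, b2, b3, b4) kv = (b0, b1 ++ [x], b2, b3, b4) := by
        simp [pvBucketStep, hr, ← hx]
      simp only [List.foldl_cons, List.map_cons, ← hx, hins, hstep]
      exact ih b0 (b1 ++ [x]) b2 b3 b4 h0
        (fun a ha => by rcases List.mem_append.1 ha with ha | ha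
                        · exact h1 a ha
                        · simp only [List.mem_singleton] at ha; simpa [ha, hk] using hr) h2 h3 h4
    · have hins : PySem.List.insertBy bef x (b0 ++ b1 ++ b2 ++ b3 ++ b4)
          = b0 ++ b1 ++ (b2 ++ [x]) ++ b3 ++ b4 := by
        rw [show b0 ++ b1 ++ b2 ++ b3 ++ b4 = b0 ++ (b1 ++ (b2 ++ (b3 ++ b4))) by simp,
          insertBy_skip bef x b0 _ (fun y hy => by simp [hbef, h0 y hy, hk, hr]),
          insertBy_skip bef x b1 _ (fun y hy => by simp [hbef, h1 y hy, hk, hr]),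
          insertBy_skip bef x b2 _ (fun y hy => by simp [hbef, h2 y hy, hk, hr]),
          insertBy_head bef x _ (by
            intro y hy
            simp only [List.mem_append] at hy
            rcases hy with hy | hy
            · simp [hbef, hk, hr, h3 y hy]
            · simp [hbef, hk, hr, h4 y hy])]
        simp
      have hstep : pvBucketStep (b0, b1, b2, b3, b4) kv = (b0, b1, b2 ++ [x], b3, b4) := by
        simp [pvBucketStep, hr, ← hx]
      simp only [List.foldl_cons, List.map_cons, ← hx, hins, hstep]
      exact ih b0 b1 (b2 ++ [x]) b3 b4 h0 h1
        (fun a ha => by rcases List.mem_append.1 ha with ha | ha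
                        · exact h2 a ha
                        · simp only [List.mem_singleton] at ha; simpa [ha, hk] using hr) h3 h4
    · have hins : PySem.List.insertBy bef x (b0 ++ b1 ++ b2 ++ b3 ++ b4)
          = b0 ++ b1 ++ b2 ++ (b3 ++ [x]) ++ b4 := by
        rw [show b0 ++ b1 ++ b2 ++ b3 ++ b4 = b0 ++ (b1 ++ (b2 ++ (b3 ++ b4))) by simp,
          insertBy_skip bef x b0 _ (fun y hy => by simp [hbef, h0 y hy, hk, hr]),
          insertBy_skip bef x b1 _ (fun y hy => by simp [hbef, h1 y hy, hk, hr]),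
          insertBy_skip bef x b2 _ (fun y hy => by simp [hbef, h2 y hy, hk, hr]),
          insertBy_skip bef x b3 _ (fun y hy => by simp [hbef, h3 y hy, hk, hr]),
          insertBy_head bef x _ (fun y hy => by simp [hbef, hk, hr, h4 y hy])]
        simp
      have hstep : pvBucketStep (b0, b1, b2, b3, b4) kv = (b0, b1, b2, b3 ++ [x], b4) := by
        simp [pvBucketStep, hr, ← hx]
      simp only [List.foldl_cons, List.map_cons, ← hx, hins, hstep]
      exact ih b0 b1 b2 (b3 ++ [x]) b4 h0 h1 h2
        (fun a ha => by rcases List.mem_append.1 ha with ha | ha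
                        · exact h3 a ha
                        · simp only [List.mem_singleton] at ha; simpa [ha, hk] using hr) h4
    · have hins : PySem.List.insertBy bef x (b0 ++ b1 ++ b2 ++ b3 ++ b4)
          = b0 ++ b1 ++ b2 ++ b3 ++ (b4 ++ [x]) := by
        rw [show b0 ++ b1 ++ b2 ++ b3 ++ b4 = (b0 ++ b1 ++ b2 ++ b3 ++ b4) ++ [] by simp,
          PySem.List.insertBy_of_forall_not_before bef x _ (by
            intro y hy
            simp only [List.append_nil, List.append_assoc, List.mem_append] at hy
            rcases hy with hy | hy | hy | hy | hy
            · simp [hbef, hk, hr, h0 y hy]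
            · simp [hbef, hk, hr, h1 y hy]
            · simp [hbef, hk, hr, h2 y hy]
            · simp [hbef, hk, hr, h3 y hy]
            · simp [hbef, hk, hr, h4 y hy])]
        simp
      have hstep : pvBucketStep (b0, b1, b2, b3, b4) kv = (b0, b1, b2, b3, b4 ++ [x]) := by
        have c0 : pvRankB kv.2 ≠ 0 := by omega
        have c1 : pvRankB kv.2 ≠ 1 := by omega
        have c2 : pvRankB kv.2 ≠ 2 := by omega
        have c3 : pvRankB kv.2 ≠ 3 := by omega
        simp [pvBucketStep, c0, c1, c2, c3, ← hx]
      simp only [List.foldl_cons, List.map_cons, ← hx, hins, hstep]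
      exact ih b0 b1 b2 b3 (b4 ++ [x]) h0 h1 h2 h3
        (fun a ha => by rcases List.mem_append.1 ha with ha | ha
                        · exact h4 a ha
                        · simp only [List.mem_singleton] at ha; simpa [ha, hk] using hr)

-- ===== VERDICT (by name: the statement is the Claim_ definition above) =====
theorem generate_skill_assessments_py_spec : Claim_equal_generate_skill_assessments_py := by
  intro sb _
  unfold Spec_generate_skill_assessments_py
  unfold generate_skill_assessments_py generate_skill_assessments_py_alt
  simp only [foldl_append_map, List.nil_append, PySem.List.sorted_eq_foldl_insertBy]
  have hmap : (fun kv : String × String => pvMkAssessment kv.1 kv.2)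
      = fun kv => pvRowB kv.1 kv.2 := funext fun kv => (pvRow_eq kv.1 kv.2).symm
  rw [hmap]
  have := pv_main (PySem.Dict.ofList sb).items [] [] [] [] []
    (by simp) (by simp) (by simp) (by simp) (by simp)
  simpa using this
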